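-- pv_equiv track=rewrite | github.com/xchdtk/Algorism | 2021.03.09/나무자르기.py | tree_cutting
-- ===== SOURCE A (Python) =====
-- def tree_cutting(n, m, tree_list):
--     tree_list.sort() # 이분 탐색은 오름차순 정렬
--     start = 0
--     end   = max(tree_list)
--
--     while start <= end:
--         mid  = (start + end) // 2
--
--         tree_count = 0
--         for tree in tree_list:
--             if tree > mid:
--                 tree_count += tree - mid
--
--         if tree_count >= m:
--             start = mid + 1
--         else:
--             end = mid - 1
--     return end
-- ===== SOURCE B (Python) =====
-- def _bisect_right(a, x):
--     lo = 0
--     hi = len(a)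
--     while lo < hi:
--         mid = (lo + hi) // 2
--         if x < a[mid]:
--             hi = mid
--         else:
--             lo = mid + 1
--     return lo
--
--
-- def tree_cutting(n, m, tree_list):
--     tree_list.sort()
--     prefix = [0]
--     acc = 0
--     for t in tree_list:
--         acc += t
--         prefix.append(acc)
--     total = acc
--     length = len(tree_list)
--     start = 0
--     end = max(tree_list)
--     while start <= end:
--         mid = (start + end) // 2
--         k = _bisect_right(tree_list, mid)
--         cnt = (total - prefix[k]) - (length - k) * mid
--         if cnt >= m:
--             start = mid + 1
--         else:
--             end = mid - 1
--     return end
-- ===== Notes on version B (the rewrite author's own statement) =====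
-- stated objective: faster
-- what changed: A's O(n) harvest scan inside every binary-search step is replaced by prefix sums computed once plus a bisect on the sorted list, so each step costs O(log n).
import Mathlib
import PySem

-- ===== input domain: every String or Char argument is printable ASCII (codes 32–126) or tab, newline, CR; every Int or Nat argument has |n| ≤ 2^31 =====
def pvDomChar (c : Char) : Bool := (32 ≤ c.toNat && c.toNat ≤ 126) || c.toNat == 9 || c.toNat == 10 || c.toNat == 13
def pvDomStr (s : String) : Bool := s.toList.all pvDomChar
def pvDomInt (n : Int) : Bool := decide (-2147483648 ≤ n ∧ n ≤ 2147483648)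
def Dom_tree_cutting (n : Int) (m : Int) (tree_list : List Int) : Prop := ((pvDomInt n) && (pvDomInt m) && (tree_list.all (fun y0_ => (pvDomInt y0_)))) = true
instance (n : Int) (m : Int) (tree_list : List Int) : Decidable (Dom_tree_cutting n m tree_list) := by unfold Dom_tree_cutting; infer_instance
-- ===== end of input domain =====

-- B replaces A's O(n) per-step harvest scan by prefix sums computed once plus a hand-written
-- bisect on the sorted list, so each binary-search step costs O(log n).  Both A and B sort
-- tree_list in place (the same side effect); the equivalence proved is about the return value.
-- The while-loops are ported as structural recursion on a fuel argument that is a strict upper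
-- bound on the interval length, so fuel is never exhausted: the fuel-0 branch is unreachable.

-- ===== PORT A =====
-- A's 'while start <= end' binary search, with the O(n) harvest scan inside
def pvALoop (l : List Int) (m : Int) : Nat → Int → Int → Int
  | 0, _, end_ => end_                    -- fuel exhausted: unreachable (fuel > end_ + 1 - start)
  | fuel + 1, start, end_ =>
    if start ≤ end_ then
      let mid := PySem.Int.floordiv (start + end_) 2
      let tree_count := l.foldl (fun acc tree => if tree > mid then acc + (tree - mid) else acc) 0
      if tree_count ≥ m then pvALoop l m fuel (mid + 1) end_ else pvALoop l m fuel start (mid - 1)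
    else end_

def tree_cutting (n : Int) (m : Int) (tree_list : List Int) : Int :=
  let l := PySem.List.sorted tree_list (fun x => x) false
  match PySem.List.max? l (fun x => x) with
  | none => 0      -- max([]) raises ValueError: excluded by Pre_
  | some mx => pvALoop l m ((mx + 1).toNat + 1) 0 mx

-- ===== PORT B =====
-- _bisect_right of Source B (its 'while lo < hi' loop, fuel = strict bound on hi - lo)
def pvBisect (a : List Int) (x : Int) : Nat → Int → Int → Int
  | 0, lo, _ => lo                        -- fuel exhausted: unreachable (fuel > hi - lo)
  | fuel + 1, lo, hi =>
    if lo < hi then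
      let mid := PySem.Int.floordiv (lo + hi) 2
      if x < PySem.List.pyGetD a mid 0 then pvBisect a x fuel lo mid
      else pvBisect a x fuel (mid + 1) hi
    else lo

-- Source B's 'while start <= end' binary search, with the bisect + prefix-sum count inside
def pvBLoop (l prefixL : List Int) (total length m : Int) : Nat → Int → Int → Int
  | 0, _, end_ => end_                    -- fuel exhausted: unreachable
  | fuel + 1, start, end_ =>
    if start ≤ end_ then
      let mid := PySem.Int.floordiv (start + end_) 2
      let k := pvBisect l mid (length.toNat + 1) 0 length
      let cnt := (total - PySem.List.pyGetD prefixL k 0) - (length - k) * mid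
      if cnt ≥ m then pvBLoop l prefixL total length m fuel (mid + 1) end_
      else pvBLoop l prefixL total length m fuel start (mid - 1)
    else end_

def tree_cutting_alt (n : Int) (m : Int) (tree_list : List Int) : Int :=
  let l := PySem.List.sorted tree_list (fun x => x) false
  let pa := l.foldl (fun (pa : List Int × Int) t => (pa.1 ++ [pa.2 + t], pa.2 + t)) ([0], 0)
  match PySem.List.max? l (fun x => x) with
  | none => 0      -- max([]) raises ValueError: excluded by Pre_
  | some mx => pvBLoop l pa.1 pa.2 (PySem.List.len l) m ((mx + 1).toNat + 1) 0 mx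

-- ===== PRECONDITION & SPEC =====
-- A raises ValueError on max([]) for an empty tree_list; Pre_ excludes exactly that.
def Pre_tree_cutting (n : Int) (m : Int) (tree_list : List Int) : Prop := tree_list ≠ []
instance (n : Int) (m : Int) (tree_list : List Int) : Decidable (Pre_tree_cutting n m tree_list) := by unfold Pre_tree_cutting; infer_instance
def pvWitness_tree_cutting : Int × Int × List Int := (4, 7, [20, 15, 10, 17])

def Spec_tree_cutting (n : Int) (m : Int) (tree_list : List Int) (out : Int) : Prop := out = tree_cutting_alt n m tree_list
instance (n : Int) (m : Int) (tree_list : List Int) (out : Int) : Decidable (Spec_tree_cutting n m tree_list out) := by unfold Spec_tree_cutting; infer_instance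

-- ===== CLAIM (what is proved, stated in full; the proofs are below) =====
def Claim_equal_tree_cutting : Prop := ∀ (n : Int) (m : Int) (tree_list : List Int), Dom_tree_cutting n m tree_list → Pre_tree_cutting n m tree_list → Spec_tree_cutting n m tree_list (tree_cutting n m tree_list)

-- ===== LEMMAS AND PROOFS =====

-- the hand-written bisect of Source B computes bisect_right on a sorted list
theorem pvBisect_eq (l : List Int) (x : Int)
    (hs : l.Pairwise (fun a b => a ≤ b)) :
    ∀ (fuel : Nat) (lo hi : Int), (hi - lo).toNat < fuel →
      0 ≤ lo → lo ≤ (PySem.List.bisectRight l x : Int) →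
      (PySem.List.bisectRight l x : Int) ≤ hi → hi ≤ l.length →
      pvBisect l x fuel lo hi = (PySem.List.bisectRight l x : Int) := by
  have spec := PySem.List.bisectRight_spec l x hs
  intro fuel
  induction fuel with
  | zero => intro lo hi hN; omega
  | succ N ih =>
    intro lo hi hN h0 hloK hKhi hhil
    rw [pvBisect]
    by_cases hlt : lo < hi
    · rw [if_pos hlt]
      have hb := PySem.Int.floordiv_two_mid_bounds (le_of_lt hlt)
      have hmlt : PySem.Int.floordiv (lo + hi) 2 < hi :=
        (PySem.Int.floordiv_lt_iff_lt_mul (by omega)).mpr (by omega)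
      have hmr : (PySem.Int.floordiv (lo + hi) 2).toNat < l.length := by omega
      have hget := PySem.List.pyGetD_eq_getElem l (0:Int)
        (show (0:Int) ≤ PySem.Int.floordiv (lo + hi) 2 by omega)
        (show PySem.Int.floordiv (lo + hi) 2 < (l.length : Int) by omega)
      simp only [hget]
      by_cases hcase : (PySem.Int.floordiv (lo + hi) 2) < (PySem.List.bisectRight l x : Int)
      · have hle : l[(PySem.Int.floordiv (lo + hi) 2).toNat] ≤ x :=
          spec.2.1 _ hmr (by omega)
        rw [if_neg (not_lt.mpr hle)]
        exact ih (PySem.Int.floordiv (lo + hi) 2 + 1) hi (by omega) (by omega) (by omega) hKhi hhil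
      · have hgt : x < l[(PySem.Int.floordiv (lo + hi) 2).toNat] :=
          spec.2.2 _ hmr (by omega)
        rw [if_pos hgt]
        exact ih lo (PySem.Int.floordiv (lo + hi) 2) (by omega) h0 hloK (by omega) (by omega)
    · rw [if_neg hlt]; omega

-- A's harvest scan as a sum
theorem cntA_eq_sum (l : List Int) (mid : Int) :
    l.foldl (fun acc tree => if tree > mid then acc + (tree - mid) else acc) 0
      = (l.map (fun t => if mid < t then t - mid else 0)).sum := by
  have hf : (fun (acc : Int) tree => if tree > mid then acc + (tree - mid) else acc)
      = fun acc tree => acc + (if mid < tree then tree - mid else 0) := by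
    funext a t; by_cases h : mid < t <;> simp [h, gt_iff_lt]
  rw [hf, PySem.List.foldl_add]
  simp

theorem take_le_of_sorted (l : List Int) (x : Int)
    (hs : l.Pairwise (fun a b => a ≤ b)) :
    ∀ t ∈ l.take (PySem.List.bisectRight l x), t ≤ x := by
  have spec := PySem.List.bisectRight_spec l x hs
  intro t ht
  obtain ⟨j, hj, rfl⟩ := List.mem_take_iff_getElem.mp ht
  exact spec.2.1 j (by omega) (by omega)

theorem drop_gt_of_sorted (l : List Int) (x : Int)
    (hs : l.Pairwise (fun a b => a ≤ b)) :
    ∀ t ∈ l.drop (PySem.List.bisectRight l x), x < t := by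
  have spec := PySem.List.bisectRight_spec l x hs
  intro t ht
  obtain ⟨j, hj, rfl⟩ := List.mem_drop_iff_getElem.mp ht
  exact spec.2.2 _ (by omega) (by omega)

-- the prefix-sum count equals A's harvest sum on a sorted list
theorem cnt_eq (l : List Int) (mid : Int) (hs : l.Pairwise (fun a b => a ≤ b)) :
    (l.sum - (l.take (PySem.List.bisectRight l mid)).sum)
      - ((l.length : Int) - (PySem.List.bisectRight l mid : Int)) * mid
      = (l.map (fun t => if mid < t then t - mid else 0)).sum := by
  have spec := PySem.List.bisectRight_spec l mid hs
  have hsplit := List.take_append_drop (PySem.List.bisectRight l mid) l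
  have hmap : (l.map (fun t => if mid < t then t - mid else 0)).sum
      = ((l.take (PySem.List.bisectRight l mid)).map (fun t => if mid < t then t - mid else 0)).sum
        + ((l.drop (PySem.List.bisectRight l mid)).map (fun t => if mid < t then t - mid else 0)).sum := by
    conv_lhs => rw [← hsplit]
    simp
  have htake : ((l.take (PySem.List.bisectRight l mid)).map (fun t => if mid < t then t - mid else 0)).sum = 0 := by
    apply List.sum_eq_zero
    intro y hy
    obtain ⟨t, ht, rfl⟩ := List.mem_map.mp hy
    have := take_le_of_sorted l mid hs t ht
    simp [not_lt.mpr this]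
  have hdrop : ((l.drop (PySem.List.bisectRight l mid)).map (fun t => if mid < t then t - mid else 0)).sum
      = (l.drop (PySem.List.bisectRight l mid)).sum
        - ((l.drop (PySem.List.bisectRight l mid)).length : Int) * mid := by
    have h1 : (l.drop (PySem.List.bisectRight l mid)).map (fun t => if mid < t then t - mid else 0)
        = (l.drop (PySem.List.bisectRight l mid)).map (fun t => t + (-mid)) := by
      apply List.map_congr_left
      intro t ht
      have := drop_gt_of_sorted l mid hs t ht
      simp [this]; omega
    rw [h1, PySem.List.sum_map_add_int, PySem.List.sum_map_const_int]
    simp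
    ring
  have hsum : l.sum = (l.take (PySem.List.bisectRight l mid)).sum + (l.drop (PySem.List.bisectRight l mid)).sum := by
    conv_lhs => rw [← hsplit]
    rw [List.sum_append]
  have hlen : (l.drop (PySem.List.bisectRight l mid)).length = l.length - PySem.List.bisectRight l mid := by
    simp
  rw [hmap, htake, hdrop, hsum, hlen]
  have hKle : PySem.List.bisectRight l mid ≤ l.length := spec.1
  push_cast [hKle]
  ring

-- the snd of Source B's prefix fold is the running total
theorem pref_snd (l : List Int) : ∀ (p0 : List Int) (a0 : Int),
    (l.foldl (fun (pa : List Int × Int) t => (pa.1 ++ [pa.2 + t], pa.2 + t)) (p0, a0)).2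
      = a0 + l.sum := by
  induction l with
  | nil => intro p0 a0; simp
  | cons t l ih => intro p0 a0; simp [List.foldl_cons, ih]; ring

-- the fst of Source B's prefix fold is the list of partial sums
theorem pref_fst (l : List Int) : ∀ (p0 : List Int) (a0 : Int),
    (l.foldl (fun (pa : List Int × Int) t => (pa.1 ++ [pa.2 + t], pa.2 + t)) (p0, a0)).1
      = p0 ++ (List.range l.length).map (fun i => a0 + (l.take (i + 1)).sum) := by
  induction l with
  | nil => intro p0 a0; simp
  | cons t l ih =>
    intro p0 a0
    rw [List.foldl_cons, ih]
    rw [List.length_cons, List.range_succ_eq_map]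
    simp only [List.map_cons, List.map_map]
    rw [List.append_assoc]
    congr 1
    simp [Function.comp, List.take_succ_cons]
    intro a ha
    ring

-- with pointwise-equal per-step counts, the two binary-search loops coincide
theorem loop_eq (l prefixL : List Int) (total length m : Int)
    (hcnt : ∀ mid : Int,
      (total - PySem.List.pyGetD prefixL (pvBisect l mid (length.toNat + 1) 0 length) 0)
          - (length - pvBisect l mid (length.toNat + 1) 0 length) * mid
        = l.foldl (fun acc tree => if tree > mid then acc + (tree - mid) else acc) 0) :
    ∀ (fuel : Nat) (start end_ : Int),
      pvBLoop l prefixL total length m fuel start end_ = pvALoop l m fuel start end_ := by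
  intro fuel
  induction fuel with
  | zero => intro start end_; rfl
  | succ N ih =>
    intro start end_
    rw [pvBLoop, pvALoop]
    by_cases hle : start ≤ end_
    · rw [if_pos hle, if_pos hle]
      simp only [hcnt]
      by_cases hc : l.foldl (fun acc tree => if tree > (PySem.Int.floordiv (start + end_) 2) then acc + (tree - (PySem.Int.floordiv (start + end_) 2)) else acc) 0 ≥ m
      · rw [if_pos hc, if_pos hc]
        exact ih _ _
      · rw [if_neg hc, if_neg hc]
        exact ih _ _
    · rw [if_neg hle, if_neg hle]

-- index K of the prefix list is the sum of the first K elements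
theorem pref_get (l : List Int) (K : Nat) (hK : K ≤ l.length) :
    PySem.List.pyGetD
      ((l.foldl (fun (pa : List Int × Int) t => (pa.1 ++ [pa.2 + t], pa.2 + t)) ([0], 0)).1)
      (K : Int) 0 = (l.take K).sum := by
  rw [pref_fst]
  rw [PySem.List.pyGetD_natCast]
  cases K with
  | zero => simp
  | succ j =>
    have hj : j < l.length := by omega
    simp [List.getD, hj]

-- ===== VERDICT (by name: the statement is the Claim_ definition above) =====
theorem tree_cutting_spec : Claim_equal_tree_cutting := by
  intro n m tl hdom hpre
  unfold Spec_tree_cutting tree_cutting tree_cutting_alt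
  have hs : (PySem.List.sorted tl (fun x => x) false).Pairwise (fun a b => a ≤ b) :=
    PySem.List.sorted_pairwise tl (fun x => x)
  cases hmax : PySem.List.max? (PySem.List.sorted tl (fun x => x) false) (fun x => x) with
  | none => simp only [hmax]
  | some mx =>
    simp only [hmax]
    have hcnt : ∀ mid : Int,
        ((PySem.List.sorted tl (fun x => x) false).foldl
            (fun (pa : List Int × Int) t => (pa.1 ++ [pa.2 + t], pa.2 + t)) ([0], 0)).2
          - PySem.List.pyGetD
              ((PySem.List.sorted tl (fun x => x) false).foldl
                (fun (pa : List Int × Int) t => (pa.1 ++ [pa.2 + t], pa.2 + t)) ([0], 0)).1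
              (pvBisect (PySem.List.sorted tl (fun x => x) false) mid
                ((PySem.List.len (PySem.List.sorted tl (fun x => x) false)).toNat + 1) 0
                (PySem.List.len (PySem.List.sorted tl (fun x => x) false))) 0
          - (PySem.List.len (PySem.List.sorted tl (fun x => x) false)
              - pvBisect (PySem.List.sorted tl (fun x => x) false) mid
                  ((PySem.List.len (PySem.List.sorted tl (fun x => x) false)).toNat + 1) 0
                  (PySem.List.len (PySem.List.sorted tl (fun x => x) false))) * mid
        = (PySem.List.sorted tl (fun x => x) false).foldl
            (fun acc tree => if tree > mid then acc + (tree - mid) else acc) 0 := by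
      intro mid
      have spec := PySem.List.bisectRight_spec (PySem.List.sorted tl (fun x => x) false) mid hs
      have hlen : PySem.List.len (PySem.List.sorted tl (fun x => x) false)
          = ((PySem.List.sorted tl (fun x => x) false).length : Int) := PySem.List.len_eq _
      have hbis : pvBisect (PySem.List.sorted tl (fun x => x) false) mid
            ((PySem.List.len (PySem.List.sorted tl (fun x => x) false)).toNat + 1) 0
            (PySem.List.len (PySem.List.sorted tl (fun x => x) false))
          = (PySem.List.bisectRight (PySem.List.sorted tl (fun x => x) false) mid : Int) := by
        rw [hlen]
        exact pvBisect_eq _ mid hs _ 0 _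
          (by simp) (by omega) (by omega) (by exact_mod_cast spec.1) (by omega)
      rw [hbis, pref_snd, pref_get _ _ spec.1, cntA_eq_sum, hlen]
      have := cnt_eq (PySem.List.sorted tl (fun x => x) false) mid hs
      omega
    exact (loop_eq _ _ _ _ m hcnt ((mx + 1).toNat + 1) 0 mx).symm
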